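-- pv_equiv track=rewrite | github.com/nikden13/practica | permutationWithAscents.py | _AddAscent
-- ===== SOURCE A (Python) =====
-- def _AddAscent(n, k, v):
--     countD, i = 0, 0
--     if len(v) == 0:
--         v.insert(i, n)
--         return v
--     while countD != k + 1:
--         i += 1
--         if i == len(v):
--             countD = k + 1
--         elif v[i - 1] > v[i]:
--             countD += 1
--     v.insert(i, n)
--     return v
-- ===== SOURCE B (Python) =====
-- def _AddAscent(n, k, v):
--     descents = [i for i in range(1, len(v)) if v[i - 1] > v[i]]
--     if k == -1:
--         pos = 0
--     elif 0 <= k < len(descents):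
--         pos = descents[k]
--     else:
--         pos = len(v)
--     v.insert(pos, n)
--     return v
-- ===== Notes on version B (the rewrite author's own statement) =====
-- stated objective: simpler
-- what changed: Replaces A's counter-driven early-stopping while-loop (mutable countD/i with a sentinel assignment to force exit) by one comprehension that collects all descent indices, followed by a direct indexed lookup to choose the insertion position.
import Mathlib
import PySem

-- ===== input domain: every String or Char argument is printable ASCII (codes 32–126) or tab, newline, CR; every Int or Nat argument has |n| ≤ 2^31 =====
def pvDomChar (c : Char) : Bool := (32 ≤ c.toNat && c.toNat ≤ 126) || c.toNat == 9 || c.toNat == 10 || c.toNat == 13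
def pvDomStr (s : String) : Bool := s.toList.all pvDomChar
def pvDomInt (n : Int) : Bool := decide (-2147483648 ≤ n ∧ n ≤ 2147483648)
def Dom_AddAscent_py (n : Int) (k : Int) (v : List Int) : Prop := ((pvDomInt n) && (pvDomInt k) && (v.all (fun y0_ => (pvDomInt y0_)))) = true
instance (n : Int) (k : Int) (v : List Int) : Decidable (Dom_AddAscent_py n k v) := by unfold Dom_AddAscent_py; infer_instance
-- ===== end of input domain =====

-- B replaces A's counter-driven while-loop by a descent-index comprehension plus a direct lookup (simpler decomposition, same O(n)).

-- ===== PORT A =====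
-- A's while-loop; fuel = v.length bounds the iterations only (the Python loop performs at most
-- v.length steps because reaching i = len(v) forces countD = k+1 and exit).
def AddAscentLoopA (k : Int) (v : List Int) : Int → Nat → Nat → Nat
  | _, i, 0 => i
  | countD, i, fuel + 1 =>
    if countD = k + 1 then i
    else
      let i' := i + 1
      if i' = v.length then AddAscentLoopA k v (k + 1) i' fuel
      else if v.getD (i' - 1) 0 > v.getD i' 0 then AddAscentLoopA k v (countD + 1) i' fuel
      else AddAscentLoopA k v countD i' fuel

def AddAscent_py (n : Int) (k : Int) (v : List Int) : List Int :=
  if v.length = 0 then PySem.List.insert v ((0 : Nat) : Int) n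
  else
    let i := AddAscentLoopA k v 0 0 v.length
    PySem.List.insert v (i : Int) n

-- ===== PORT B =====
def AddAscent_py_alt (n : Int) (k : Int) (v : List Int) : List Int :=
  let descents := (List.range v.length).filter (fun i => 1 ≤ i && decide (v.getD (i - 1) 0 > v.getD i 0))
  let pos : Nat :=
    if k = -1 then 0
    else if 0 ≤ k ∧ k < descents.length then descents.getD k.toNat 0
    else v.length
  PySem.List.insert v (pos : Int) n

-- ===== PRECONDITION & SPEC =====
def Spec_AddAscent_py (n : Int) (k : Int) (v : List Int) (out : List Int) : Prop := out = AddAscent_py_alt n k v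
instance (n : Int) (k : Int) (v : List Int) (out : List Int) : Decidable (Spec_AddAscent_py n k v out) := by unfold Spec_AddAscent_py; infer_instance

-- ===== CLAIM (what is proved, stated in full; the proofs are below) =====
def Claim_equal_AddAscent_py : Prop := ∀ (n : Int) (k : Int) (v : List Int), Dom_AddAscent_py n k v → Spec_AddAscent_py n k v (AddAscent_py n k v)

-- ===== LEMMAS AND PROOFS =====

-- the descent indices strictly beyond i, in increasing order
def descTail (v : List Int) (i : Nat) : List Nat :=
  (List.range' (i + 1) (v.length - (i + 1))).filter (fun j => decide (v.getD (j - 1) 0 > v.getD j 0))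

theorem loopA_done (k : Int) (v : List Int) (i : Nat) (fuel : Nat) :
    AddAscentLoopA k v (k + 1) i fuel = i := by
  cases fuel with
  | zero => rfl
  | succ m => simp [AddAscentLoopA]

theorem descTail_last (v : List Int) (i : Nat) (h : i + 1 = v.length) : descTail v i = [] := by
  unfold descTail
  rw [h]
  simp

theorem descTail_step (v : List Int) (i : Nat) (h : i + 1 < v.length) :
    descTail v i = (if v.getD i 0 > v.getD (i + 1) 0 then [i + 1] else []) ++ descTail v (i + 1) := by
  unfold descTail
  have h1 : v.length - (i + 1) = (v.length - (i + 2)) + 1 := by omega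
  rw [h1, List.range'_succ, List.filter_cons]
  split_ifs with hd <;> simp_all; omega

theorem loopA_neg (k : Int) (v : List Int) (hk : k + 1 < 0) :
    ∀ (fuel i : Nat) (c : Int), 0 ≤ c → v.length ≤ i + fuel → i < v.length →
      AddAscentLoopA k v c i fuel = v.length := by
  intro fuel
  induction fuel with
  | zero => intro i c _ h1 h2; omega
  | succ m ih =>
    intro i c hc h1 h2
    have hne : ¬ c = k + 1 := by omega
    simp only [AddAscentLoopA, hne, if_false]
    by_cases he : i + 1 = v.length
    · rw [if_pos he, loopA_done, he]
    · rw [if_neg he]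
      have hi' : i + 1 < v.length := by omega
      split_ifs with hd
      · exact ih (i + 1) (c + 1) (by omega) (by omega) hi'
      · exact ih (i + 1) c hc (by omega) hi'

theorem loopA_inv (k : Int) (v : List Int) (hk : 0 ≤ k) :
    ∀ (fuel i : Nat) (c : Int), 0 ≤ c → c ≤ k → v.length ≤ i + fuel → i < v.length →
      AddAscentLoopA k v c i fuel =
        (if (k - c).toNat < (descTail v i).length then (descTail v i).getD (k - c).toNat 0 else v.length) := by
  intro fuel
  induction fuel with
  | zero => intro i c _ _ h1 h2; omega
  | succ m ih =>
    intro i c hc0 hck h1 h2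
    have hne : ¬ c = k + 1 := by omega
    simp only [AddAscentLoopA, hne, if_false]
    by_cases he : i + 1 = v.length
    · rw [if_pos he, loopA_done, descTail_last v i he, he]
      simp
    · rw [if_neg he]
      have hi' : i + 1 < v.length := by omega
      rw [descTail_step v i (by omega)]
      by_cases hd : v.getD i 0 > v.getD (i + 1) 0
      · have hd' : v.getD (i + 1 - 1) 0 > v.getD (i + 1) 0 := by simpa using hd
        rw [if_pos hd', if_pos hd]
        by_cases hck' : c = k
        · subst hck'
          rw [loopA_done]
          simp
        · rw [ih (i + 1) (c + 1) (by omega) (by omega) (by omega) hi']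
          have ht : (k - c).toNat = (k - (c + 1)).toNat + 1 := by omega
          rw [ht]
          simp
      · have hd' : ¬ v.getD (i + 1 - 1) 0 > v.getD (i + 1) 0 := by simpa using hd
        rw [if_neg hd', if_neg hd]
        rw [ih (i + 1) c hc0 hck (by omega) hi']
        simp

-- B's descents list is exactly descTail v 0
theorem descents_eq_descTail (v : List Int) :
    (List.range v.length).filter (fun i => 1 ≤ i && decide (v.getD (i - 1) 0 > v.getD i 0)) =
      descTail v 0 := by
  unfold descTail
  cases hL : v.length with
  | zero => simp
  | succ m =>
    rw [List.range_eq_range']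
    have : List.range' 0 (m + 1) = 0 :: List.range' 1 m := by
      rw [List.range'_succ]
    rw [this, List.filter_cons]
    simp only [show m + 1 - (0 + 1) = m by omega]
    have : ∀ j ∈ List.range' 1 m,
        (1 ≤ j && decide (v.getD (j - 1) 0 > v.getD j 0)) = decide (v.getD (j - 1) 0 > v.getD j 0) := by
      intro j hj
      have : 1 ≤ j := (List.mem_range'_1.mp hj).1
      simp [this]
    rw [List.filter_congr this]
    simp

-- ===== VERDICT (by name: the statement is the Claim_ definition above) =====
theorem AddAscent_py_spec : Claim_equal_AddAscent_py := by
  intro n k v _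
  unfold Spec_AddAscent_py
  simp only [AddAscent_py, AddAscent_py_alt, descents_eq_descTail]
  by_cases hv : v.length = 0
  · have hd0 : descTail v 0 = [] := by unfold descTail; rw [hv]; simp
    rw [if_pos hv, hd0]
    split_ifs with h1 h2 <;> simp [hv]
  · rw [if_neg hv]
    have hvpos : 0 < v.length := Nat.pos_of_ne_zero hv
    by_cases hk1 : k = -1
    · subst hk1
      have hz : AddAscentLoopA (-1) v 0 0 v.length = 0 := by
        have := loopA_done (-1) v 0 v.length
        simpa using this
      rw [hz, if_pos rfl]
    · rw [if_neg hk1]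
      by_cases hk0 : 0 ≤ k
      · rw [loopA_inv k v hk0 v.length 0 0 le_rfl hk0 (by omega) hvpos]
        have hsub : (k - 0).toNat = k.toNat := by omega
        rw [hsub]
        split_ifs with h1 h2 h2 <;> first | rfl | (exfalso; omega)
      · have hkneg : k + 1 < 0 := by omega
        rw [loopA_neg k v hkneg v.length 0 0 le_rfl (by omega) hvpos]
        split_ifs with h1 <;> first | rfl | (exfalso; omega)
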